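-- pv_equiv track=rewrite | github.com/michaelsamsonjacobs-cpu/chess | src/chessguard/data/ingest.py | infer_compression_from_path
-- ===== SOURCE A (Python) =====
-- from typing import Any, Dict, List, Mapping, MutableMapping, Optional, Sequence, Tuple
--
-- def infer_compression_from_path(path: str) -> Optional[str]:
--     """Infer the compression type based on a filename or URL."""
--
--     lowered = path.lower()
--     for suffix, comp in {
--         ".gz": "gzip",
--         ".gzip": "gzip",
--         ".bz2": "bz2",
--         ".xz": "xz",
--         ".lzma": "xz",
--         ".zst": "zstd",
--     }.items():
--         if lowered.endswith(suffix):
--             return comp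
--     return None
-- ===== SOURCE B (Python) =====
-- _COMPRESSION = {
--     ".gz": "gzip",
--     ".gzip": "gzip",
--     ".bz2": "bz2",
--     ".xz": "xz",
--     ".lzma": "xz",
--     ".zst": "zstd",
-- }
--
-- def infer_compression_from_path(path):
--     """Infer the compression type based on a filename or URL."""
--     lowered = path.lower()
--     _head, dot, ext = lowered.rpartition('.')
--     if not dot:
--         return None
--     return _COMPRESSION.get('.' + ext)
-- ===== Notes on version B (the rewrite author's own statement) =====
-- stated objective: simpler
-- what changed: Instead of scanning six endswith suffixes in order, B splits off the final '.'-extension once with rpartition and does a single dict lookup; the loop over the dict disappears.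
import Mathlib
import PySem

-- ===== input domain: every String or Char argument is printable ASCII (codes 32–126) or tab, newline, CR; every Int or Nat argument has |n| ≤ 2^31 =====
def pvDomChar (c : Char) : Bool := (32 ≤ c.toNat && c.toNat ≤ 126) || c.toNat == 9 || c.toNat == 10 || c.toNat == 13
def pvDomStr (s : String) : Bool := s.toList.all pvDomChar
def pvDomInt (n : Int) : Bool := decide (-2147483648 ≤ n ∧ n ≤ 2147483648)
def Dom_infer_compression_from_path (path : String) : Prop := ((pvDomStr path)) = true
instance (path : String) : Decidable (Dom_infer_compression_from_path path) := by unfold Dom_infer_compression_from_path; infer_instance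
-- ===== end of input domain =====

-- B replaces A's ordered scan over six endswith suffixes by one rpartition on the dot plus a single dict lookup (objective: simpler).

-- ===== PORT A =====
def infer_compression_from_path (path : String) : Option String :=
  let lowered := PySem.Str.lower path
  if PySem.Str.endswith lowered ".gz" then some "gzip"
  else if PySem.Str.endswith lowered ".gzip" then some "gzip"
  else if PySem.Str.endswith lowered ".bz2" then some "bz2"
  else if PySem.Str.endswith lowered ".xz" then some "xz"
  else if PySem.Str.endswith lowered ".lzma" then some "xz"
  else if PySem.Str.endswith lowered ".zst" then some "zstd"
  else none

-- ===== PORT B =====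
-- the module-level _COMPRESSION dict of Source B (string keys carried as List Char, the PySem string representation)
def pvCompDict : PySem.Dict (List Char) String :=
  ⟨[(['.','g','z'], "gzip"), (['.','g','z','i','p'], "gzip"), (['.','b','z','2'], "bz2"),
    (['.','x','z'], "xz"), (['.','l','z','m','a'], "xz"), (['.','z','s','t'], "zstd")]⟩

def infer_compression_from_path_alt (path : String) : Option String :=
  let lowered := PySem.Chars.lower path.toList
  -- rpartition on the dot character, ported by hand on the char list (exact for every string):
  -- ext = the run after the last dot; dot = the rest of the reversed list (empty iff no dot occurs)
  let ext := (lowered.reverse.takeWhile (fun c => c != '.')).reverse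
  let dot := lowered.reverse.dropWhile (fun c => c != '.')
  if dot = [] then none
  else PySem.Dict.get? pvCompDict ('.' :: ext)

-- ===== PRECONDITION & SPEC =====
def Spec_infer_compression_from_path (path : String) (out : Option String) : Prop := out = infer_compression_from_path_alt path
instance (path : String) (out : Option String) : Decidable (Spec_infer_compression_from_path path out) := by unfold Spec_infer_compression_from_path; infer_instance

-- ===== CLAIM (what is proved, stated in full; the proofs are below) =====
def Claim_equal_infer_compression_from_path : Prop := ∀ (path : String), Dom_infer_compression_from_path path → Spec_infer_compression_from_path path (infer_compression_from_path path)

-- ===== LEMMAS AND PROOFS =====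

-- a list ends in dot-then-p (p dot-free) iff, reversed, the dot-free head run is exactly p.reverse and a dot follows it
theorem pv_prefix_dot (p r : List Char) (hp : ∀ c ∈ p, (c != '.') = true) :
    (p ++ ['.']) <+: r ↔ (r.takeWhile (fun c => c != '.') = p ∧ r.dropWhile (fun c => c != '.') ≠ []) := by
  induction p generalizing r with
  | nil =>
    cases r with
    | nil => simp
    | cons c t =>
      by_cases hc : c = '.'
      · subst hc; simp
      · have hcd : (c != '.') = true := by simp [hc]
        constructor
        · intro h
          exact absurd (List.cons_prefix_cons.mp h).1.symm hc
        · rintro ⟨h1, -⟩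
          rw [List.takeWhile_cons, if_pos hcd] at h1
          simp at h1
  | cons a p ih =>
    have ha : (a != '.') = true := hp a (by simp)
    cases r with
    | nil => simp
    | cons c t =>
      by_cases hc : c = a
      · subst hc
        simp only [List.cons_append, List.cons_prefix_cons, List.takeWhile_cons,
          List.dropWhile_cons, ha, if_pos, true_and]
        rw [ih t (fun c hcp => hp c (by simp [hcp]))]
        simp
      · constructor
        · intro h
          exact absurd (List.cons_prefix_cons.mp h).1 (fun e => hc e.symm)
        · rintro ⟨h1, -⟩
          exfalso
          by_cases hcd : (c != '.') = true
          · rw [List.takeWhile_cons, if_pos hcd] at h1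
            exact hc (List.cons.injEq .. ▸ h1).1
          · rw [List.takeWhile_cons, if_neg hcd] at h1
            simp at h1

theorem pv_endswith_char (l suf : List Char) (hp : ∀ c ∈ suf, (c != '.') = true) :
    PySem.Chars.endswith l ('.' :: suf) =
      (decide (l.reverse.dropWhile (fun c => c != '.') ≠ []) &&
       decide ((l.reverse.takeWhile (fun c => c != '.')).reverse = suf)) := by
  have h1 : PySem.Chars.endswith l ('.' :: suf) = true ↔ ('.' :: suf) <:+ l :=
    PySem.Chars.endswith_iff l _
  have h2 : ('.' :: suf) <:+ l ↔ (suf.reverse ++ ['.']) <+: l.reverse := by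
    rw [← List.reverse_prefix]
    simp
  rw [pv_prefix_dot suf.reverse l.reverse (by intro c hc; exact hp c (by simpa using hc))] at h2
  by_cases hb : PySem.Chars.endswith l ('.' :: suf) = true
  · rw [hb]
    have hs := (h1.trans h2).mp hb
    symm
    rw [Bool.and_eq_true]
    exact ⟨by simpa using hs.2, by rw [decide_eq_true_iff, hs.1]; simp⟩
  · have hbf : PySem.Chars.endswith l ('.' :: suf) = false := by simpa using hb
    rw [hbf]
    have hs : ¬(l.reverse.takeWhile (fun c => c != '.') = suf.reverse ∧
        l.reverse.dropWhile (fun c => c != '.') ≠ []) := fun h => hb ((h1.trans h2).mpr h)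
    symm
    rw [Bool.and_eq_false_iff]
    by_cases hd : l.reverse.dropWhile (fun c => c != '.') = []
    · left; simp [hd]
    · right
      rw [decide_eq_false_iff_not]
      intro he
      exact hs ⟨by rw [← he]; simp, hd⟩

-- ===== VERDICT (by name: the statement is the Claim_ definition above) =====
set_option maxRecDepth 10000 in
theorem infer_compression_from_path_spec : Claim_equal_infer_compression_from_path := by
  intro path _
  unfold Spec_infer_compression_from_path infer_compression_from_path infer_compression_from_path_alt
  simp only [PySem.Str.endswith_eq, PySem.Str.toList_lower]
  set l := PySem.Chars.lower path.toList with hl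
  rw [show ".gz".toList = ['.','g','z'] from by decide,
      show ".gzip".toList = ['.','g','z','i','p'] from by decide,
      show ".bz2".toList = ['.','b','z','2'] from by decide,
      show ".xz".toList = ['.','x','z'] from by decide,
      show ".lzma".toList = ['.','l','z','m','a'] from by decide,
      show ".zst".toList = ['.','z','s','t'] from by decide]
  rw [pv_endswith_char l ['g','z'] (by simp),
      pv_endswith_char l ['g','z','i','p'] (by simp),
      pv_endswith_char l ['b','z','2'] (by simp),
      pv_endswith_char l ['x','z'] (by simp),
      pv_endswith_char l ['l','z','m','a'] (by simp),
      pv_endswith_char l ['z','s','t'] (by simp)]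
  set t := (l.reverse.takeWhile (fun c => c != '.')).reverse with ht
  by_cases hd : l.reverse.dropWhile (fun c => c != '.') = []
  · simp [hd]
  · simp only [hd, ne_eq, not_false_eq_true, decide_true, Bool.true_and]
    by_cases h1 : t = ['g','z']; · simp only [h1]; decide
    by_cases h2 : t = ['g','z','i','p']; · simp only [h2]; decide
    by_cases h3 : t = ['b','z','2']; · simp only [h3]; decide
    by_cases h4 : t = ['x','z']; · simp only [h4]; decide
    by_cases h5 : t = ['l','z','m','a']; · simp only [h5]; decide
    by_cases h6 : t = ['z','s','t']; · simp only [h6]; decide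
    have e1 : ((['.','g','z'] : List Char) == '.' :: t) = false := by simp; exact fun e => h1 e.symm
    have e2 : ((['.','g','z','i','p'] : List Char) == '.' :: t) = false := by simp; exact fun e => h2 e.symm
    have e3 : ((['.','b','z','2'] : List Char) == '.' :: t) = false := by simp; exact fun e => h3 e.symm
    have e4 : ((['.','x','z'] : List Char) == '.' :: t) = false := by simp; exact fun e => h4 e.symm
    have e5 : ((['.','l','z','m','a'] : List Char) == '.' :: t) = false := by simp; exact fun e => h5 e.symm
    have e6 : ((['.','z','s','t'] : List Char) == '.' :: t) = false := by simp; exact fun e => h6 e.symm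
    simp [h1, h2, h3, h4, h5, h6, pvCompDict, PySem.Dict.get?, List.find?, e1, e2, e3, e4, e5, e6]
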